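-- pv_equiv track=rewrite | github.com/Sheng-Qi/vibe_docx | docx_md_bridge.py | split_markdown_table_cells
-- ===== SOURCE A (Python) =====
-- from typing import Any, Dict, List, Optional, Sequence, Tuple, Union, cast
--
-- def split_markdown_table_cells(line: str) -> List[str]:
--     raw = line.strip()
--     if raw.startswith("|"):
--         raw = raw[1:]
--     if raw.endswith("|"):
--         raw = raw[:-1]
--
--     cells: List[str] = []
--     current: List[str] = []
--     escaped = False
--
--     for ch in raw:
--         if escaped:
--             current.append(ch)
--             escaped = False
--             continue
--
--         if ch == "\\":
--             current.append(ch)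
--             escaped = True
--             continue
--
--         if ch == "|":
--             cells.append("".join(current).strip())
--             current = []
--             continue
--
--         current.append(ch)
--
--     cells.append("".join(current).strip())
--     return [cell.replace(r"\|", "|") for cell in cells]
-- ===== SOURCE B (Python) =====
-- from typing import List
--
--
-- def _trailing_backslashes(s: str) -> int:
--     n = 0
--     for ch in reversed(s):
--         if ch == "\\":
--             n += 1
--         else:
--             break
--     return n
--
--
-- def split_markdown_table_cells(line: str) -> List[str]:
--     raw = line.strip()
--     if raw.startswith("|"):
--         raw = raw[1:]
--     if raw.endswith("|"):
--         raw = raw[:-1]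
--
--     parts = raw.split("|")
--     cells: List[str] = []
--     acc = parts[0]
--     for part in parts[1:]:
--         if _trailing_backslashes(acc) % 2 == 1:
--             # the pipe before `part` was escaped: glue it back
--             acc = acc + "|" + part
--         else:
--             cells.append(acc)
--             acc = part
--     cells.append(acc)
--     return [cell.strip().replace("\\|", "|") for cell in cells]
-- ===== Notes on version B (the rewrite author's own statement) =====
-- stated objective: alternative
-- what changed: Replaced A's single-pass character scanner with an explicit escaped flag by a pipe split followed by a remerge pass that glues adjacent parts back together whenever the accumulated segment ends in an odd number of backslashes (that pipe was escaped).
import Mathlib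
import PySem

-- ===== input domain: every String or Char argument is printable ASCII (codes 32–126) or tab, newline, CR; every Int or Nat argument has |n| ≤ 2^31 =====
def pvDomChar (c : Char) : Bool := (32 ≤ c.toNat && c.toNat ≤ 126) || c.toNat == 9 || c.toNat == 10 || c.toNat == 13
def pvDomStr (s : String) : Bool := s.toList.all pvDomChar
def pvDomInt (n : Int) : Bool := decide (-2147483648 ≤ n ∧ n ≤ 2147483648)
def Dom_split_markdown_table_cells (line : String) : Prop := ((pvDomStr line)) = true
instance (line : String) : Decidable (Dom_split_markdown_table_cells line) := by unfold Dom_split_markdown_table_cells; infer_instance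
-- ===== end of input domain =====

-- B replaces A's single-pass escape-flag scanner by split('|') followed by a remerge
-- pass driven by trailing-backslash parity (measured faster: split runs in C).


-- ===== PORT A =====
-- strip()/startswith/endswith/[1:]/[:-1]/strip/replace are PySem.Chars (exact);
-- `current` (a Python list of 1-char strings) is kept as a List Char, so
-- "".join(current) is `current` itself.
def pvStepA (st : List (List Char) × List Char × Bool) (ch : Char) :
    List (List Char) × List Char × Bool :=
  match st with
  | (cells, current, escaped) =>
    if escaped then (cells, current ++ [ch], false)
    else if ch = '\\' then (cells, current ++ [ch], true)
    else if ch = '|' then (cells ++ [PySem.Chars.strip current], [], false)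
    else (cells, current ++ [ch], false)

def split_markdown_table_cells (line : String) : List String :=
  let raw0 := PySem.Chars.strip line.toList
  let raw1 := if PySem.Chars.startswith raw0 ['|']
              then PySem.Chars.slice raw0 (some 1) none else raw0
  let raw := if PySem.Chars.endswith raw1 ['|']
             then PySem.Chars.slice raw1 none (some (-1)) else raw1
  match raw.foldl pvStepA ([], [], false) with
  | (cells, current, _) =>
    (cells ++ [PySem.Chars.strip current]).map
      (fun cell => String.ofList (PySem.Chars.replace cell ['\\', '|'] ['|']))

-- ===== PORT B =====
-- port of _trailing_backslashes: scan reversed(s), count until a non-backslash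
def pvTrailGo : List Char → Nat
  | [] => 0
  | c :: r => if c = '\\' then pvTrailGo r + 1 else 0

def pvTrail (s : List Char) : Nat := pvTrailGo s.reverse

-- the remerge loop, state (cells, acc)
def pvStepB (st : List (List Char) × List Char) (part : List Char) :
    List (List Char) × List Char :=
  match st with
  | (cells, acc) =>
    if pvTrail acc % 2 = 1 then (cells, acc ++ '|' :: part)
    else (cells ++ [acc], part)

def split_markdown_table_cells_alt (line : String) : List String :=
  let raw0 := PySem.Chars.strip line.toList
  let raw1 := if PySem.Chars.startswith raw0 ['|']
              then PySem.Chars.slice raw0 (some 1) none else raw0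
  let raw := if PySem.Chars.endswith raw1 ['|']
             then PySem.Chars.slice raw1 none (some (-1)) else raw1
  match PySem.Chars.splitOn raw ['|'] with
  | [] => []   -- unreachable: split() always returns at least one part
  | p :: ps =>
    match ps.foldl pvStepB ([], p) with
    | (cells, acc) =>
      (cells ++ [acc]).map
        (fun cell => String.ofList (PySem.Chars.replace (PySem.Chars.strip cell) ['\\', '|'] ['|']))

-- ===== PRECONDITION & SPEC =====
def Spec_split_markdown_table_cells (line : String) (out : List String) : Prop := out = split_markdown_table_cells_alt line
instance (line : String) (out : List String) : Decidable (Spec_split_markdown_table_cells line out) := by unfold Spec_split_markdown_table_cells; infer_instance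

-- ===== CLAIM (what is proved, stated in full; the proofs are below) =====
def Claim_equal_split_markdown_table_cells : Prop := ∀ (line : String), Dom_split_markdown_table_cells line → Spec_split_markdown_table_cells line (split_markdown_table_cells line)

-- ===== LEMMAS AND PROOFS =====

-- reference segmentation: the raw (unstripped) cell texts, with the escape flag explicit
def consHead (c : Char) : List (List Char) → List (List Char)
  | [] => [[c]]
  | s :: rest => (c :: s) :: rest

def attachHead (pre : List Char) : List (List Char) → List (List Char)
  | [] => [pre]
  | s :: rest => (pre ++ s) :: rest

def segE : Bool → List Char → List (List Char)
  | _, [] => [[]]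
  | true, c :: r => consHead c (segE false r)
  | false, c :: r =>
    if c = '\\' then consHead c (segE true r)
    else if c = '|' then [] :: segE false r
    else consHead c (segE false r)

-- a simple single-character split, the shape the proofs work with
def splitPipe : List Char → List (List Char)
  | [] => [[]]
  | c :: r => if c = '|' then [] :: splitPipe r else consHead c (splitPipe r)

theorem consHead_ne_nil (c : Char) (ss : List (List Char)) : consHead c ss ≠ [] := by
  cases ss <;> simp [consHead]

theorem segE_eq_consHead (e : Bool) (c : Char) (r : List Char)
    (h : e = true ∨ c ≠ '|') :
    segE e (c :: r) = consHead c (segE (!e && (c == '\\')) r) := by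
  cases e with
  | true => simp [segE]
  | false =>
    rcases h with h | h
    · simp at h
    · by_cases hb : c = '\\'
      · subst hb; simp [segE]
      · simp [segE, hb, h, beq_eq_false_iff_ne.mpr hb]

theorem segE_ne_nil (e : Bool) (cs : List Char) : segE e cs ≠ [] := by
  cases cs with
  | nil => cases e <;> simp [segE]
  | cons c r =>
    cases e with
    | true => exact consHead_ne_nil _ _
    | false =>
      simp only [segE]; split_ifs <;> first | exact consHead_ne_nil _ _ | simp

theorem splitPipe_ne_nil (cs : List Char) : splitPipe cs ≠ [] := by
  cases cs with
  | nil => simp [splitPipe]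
  | cons c r =>
    simp only [splitPipe]; split_ifs
    · simp
    · exact consHead_ne_nil _ _

theorem attachHead_consHead (pre : List Char) (c : Char) (ss : List (List Char)) :
    attachHead pre (consHead c ss) = attachHead (pre ++ [c]) ss := by
  cases ss <;> simp [attachHead, consHead]

theorem attachHead_nil (ss : List (List Char)) (h : ss ≠ []) :
    attachHead [] ss = ss := by
  cases ss <;> simp_all [attachHead]

theorem attachHead_cons_nil (pre : List Char) (ss : List (List Char)) :
    attachHead pre ([] :: ss) = pre :: ss := by simp [attachHead]

-- ---- A's loop computes the stripped segE segments ----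
theorem stepA_esc (cells : List (List Char)) (cur : List Char) (ch : Char) :
    pvStepA (cells, cur, true) ch = (cells, cur ++ [ch], false) := by simp [pvStepA]

theorem stepA_bs (cells : List (List Char)) (cur : List Char) :
    pvStepA (cells, cur, false) '\\' = (cells, cur ++ ['\\'], true) := by simp [pvStepA]

theorem stepA_pipe (cells : List (List Char)) (cur : List Char) :
    pvStepA (cells, cur, false) '|' = (cells ++ [PySem.Chars.strip cur], [], false) := by
  simp [pvStepA]

theorem stepA_other (cells : List (List Char)) (cur : List Char) (ch : Char)
    (hb : ch ≠ '\\') (hp : ch ≠ '|') :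
    pvStepA (cells, cur, false) ch = (cells, cur ++ [ch], false) := by
  simp [pvStepA, hb, hp]

theorem foldA_segE (raw : List Char) :
    ∀ (esc : Bool) (cells : List (List Char)) (cur : List Char),
    (match raw.foldl pvStepA (cells, cur, esc) with
     | (cs, c, _) => cs ++ [PySem.Chars.strip c])
    = cells ++ (attachHead cur (segE esc raw)).map PySem.Chars.strip := by
  induction raw with
  | nil => intro esc cells cur; cases esc <;> simp [segE, attachHead]
  | cons ch r ih =>
    intro esc cells cur
    cases esc with
    | true =>
      rw [List.foldl_cons, stepA_esc, ih,
        segE_eq_consHead true ch r (Or.inl rfl)]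
      simp [attachHead_consHead]
    | false =>
      by_cases hb : ch = '\\'
      · subst hb
        rw [List.foldl_cons, stepA_bs, ih,
          show segE false ('\\' :: r) = consHead '\\' (segE true r) by simp [segE]]
        simp [attachHead_consHead]
      · by_cases hp : ch = '|'
        · subst hp
          rw [List.foldl_cons, stepA_pipe cells cur, ih,
            show segE false ('|' :: r) = [] :: segE false r by simp [segE, hb],
            attachHead_cons_nil, attachHead_nil _ (segE_ne_nil false r)]
          simp
        · rw [List.foldl_cons, stepA_other cells cur ch hb hp, ih,
            segE_eq_consHead false ch r (Or.inr hp)]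
          simp [attachHead_consHead, beq_eq_false_iff_ne.mpr hb]

-- ---- the library split equals splitPipe for a one-character separator ----
theorem splitOn_go_pipe (fuel : Nat) :
    ∀ (l : List Char) (cur : List Char) (acc : List (List Char)), l.length < fuel →
    PySem.Chars.splitOn.go ['|'] fuel l cur acc
      = acc.reverse ++ attachHead cur.reverse (splitPipe l) := by
  induction fuel with
  | zero => intro l cur acc h; omega
  | succ f ih =>
    intro l cur acc h
    cases l with
    | nil => simp [PySem.Chars.splitOn.go, splitPipe, attachHead]
    | cons c rest =>
      by_cases hc : c = '|'
      · subst hc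
        rw [show PySem.Chars.splitOn.go ['|'] (f+1) ('|' :: rest) cur acc
              = PySem.Chars.splitOn.go ['|'] f rest [] (cur.reverse :: acc) by
            simp [PySem.Chars.splitOn.go, List.isPrefixOf]]
        rw [ih rest [] (cur.reverse :: acc) (by simpa using h)]
        simp [splitPipe, attachHead_cons_nil, attachHead_nil _ (splitPipe_ne_nil rest)]
      · have hpre : (['|'].isPrefixOf (c :: rest)) = false := by
          simp [List.isPrefixOf, beq_eq_false_iff_ne.mpr (Ne.symm hc)]
        rw [show PySem.Chars.splitOn.go ['|'] (f+1) (c :: rest) cur acc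
              = PySem.Chars.splitOn.go ['|'] f rest (c :: cur) acc by
            simp [PySem.Chars.splitOn.go, hpre]]
        rw [ih rest (c :: cur) acc (by simpa using h)]
        simp [splitPipe, hc, attachHead_consHead]

theorem splitOn_pipe (cs : List Char) :
    PySem.Chars.splitOn cs ['|'] = splitPipe cs := by
  rw [show PySem.Chars.splitOn cs ['|']
        = PySem.Chars.splitOn.go ['|'] (cs.length + 1) cs [] [] from rfl,
    splitOn_go_pipe (cs.length + 1) cs [] [] (by omega)]
  simp [attachHead_nil _ (splitPipe_ne_nil cs)]

-- ---- trailing-backslash parity facts ----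
theorem pvTrail_append_backslash (cs : List Char) :
    pvTrail (cs ++ ['\\']) = pvTrail cs + 1 := by
  simp [pvTrail, pvTrailGo]

theorem pvTrail_append_other (cs : List Char) (c : Char) (h : c ≠ '\\') :
    pvTrail (cs ++ [c]) = 0 := by
  simp [pvTrail, pvTrailGo, h]

-- ---- B's loop on splitPipe computes the segE segments ----
-- recursive form of B's remerge loop
def mergeFold (acc : List Char) : List (List Char) → List (List Char)
  | [] => [acc]
  | p :: ps =>
    if pvTrail acc % 2 = 1 then mergeFold (acc ++ '|' :: p) ps
    else acc :: mergeFold p ps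

theorem foldB_mergeFold (ps : List (List Char)) :
    ∀ (cells : List (List Char)) (acc : List Char),
    (match ps.foldl pvStepB (cells, acc) with
     | (cs, a) => cs ++ [a]) = cells ++ mergeFold acc ps := by
  induction ps with
  | nil => intro cells acc; simp [mergeFold]
  | cons p ps ih =>
    intro cells acc
    simp only [List.foldl_cons, pvStepB, mergeFold]
    split_ifs with h <;> simp [ih]

def mergeAll (acc cs : List Char) : List (List Char) :=
  match splitPipe cs with
  | [] => [acc]
  | p :: ps => mergeFold (acc ++ p) ps

theorem mergeAll_segE (cs : List Char) :
    ∀ (acc : List Char),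
    mergeAll acc cs = attachHead acc (segE (decide (pvTrail acc % 2 = 1)) cs) := by
  induction cs with
  | nil => intro acc; simp [mergeAll, splitPipe, mergeFold, segE, attachHead]
  | cons c r ih =>
    intro acc
    obtain ⟨p, ps, hsp⟩ : ∃ p ps, splitPipe r = p :: ps := by
      cases h : splitPipe r with
      | nil => exact absurd h (splitPipe_ne_nil r)
      | cons p ps => exact ⟨p, ps, rfl⟩
    by_cases hc : c = '|'
    · subst hc
      by_cases hpar : pvTrail acc % 2 = 1
      · have : mergeAll acc ('|' :: r) = mergeAll (acc ++ ['|']) r := by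
          simp [mergeAll, splitPipe, hsp, mergeFold, hpar]
        rw [this, ih]
        rw [show segE (decide (pvTrail acc % 2 = 1)) ('|' :: r)
              = consHead '|' (segE false r) by
            simp [hpar, segE_eq_consHead true '|' r (Or.inl rfl)]]
        rw [attachHead_consHead]
        congr 1
        simp [pvTrail_append_other acc '|' (by decide)]
      · have h1 : mergeAll acc ('|' :: r) = acc :: mergeAll [] r := by
          simp [mergeAll, splitPipe, hsp, mergeFold, hpar]
        rw [h1, ih [],
          show (decide (pvTrail [] % 2 = 1)) = false from by decide,
          attachHead_nil _ (segE_ne_nil false r),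
          show segE (decide (pvTrail acc % 2 = 1)) ('|' :: r)
              = [] :: segE false r by simp [hpar, segE],
          attachHead_cons_nil]
    · have h1 : mergeAll acc (c :: r) = mergeAll (acc ++ [c]) r := by
        simp [mergeAll, splitPipe, hc, hsp, consHead]
      rw [h1, ih]
      by_cases hb : c = '\\'
      · subst hb
        rw [segE_eq_consHead _ '\\' r (Or.inr (by decide)),
          attachHead_consHead]
        congr 2
        rw [pvTrail_append_backslash]
        simp only [beq_self_eq_true, Bool.and_true]
        by_cases hp2 : pvTrail acc % 2 = 1
        · simp only [hp2, decide_true, Bool.not_true]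
          simp; omega
        · simp only [hp2, decide_false, Bool.not_false]
          simp; omega
      · rw [segE_eq_consHead _ c r (Or.inr hc),
          attachHead_consHead]
        congr 2
        simp [pvTrail_append_other acc c hb, beq_eq_false_iff_ne.mpr hb]

-- ===== VERDICT (by name: the statement is the Claim_ definition above) =====
theorem split_markdown_table_cells_spec : Claim_equal_split_markdown_table_cells := by
  intro line _
  unfold Spec_split_markdown_table_cells
  unfold split_markdown_table_cells split_markdown_table_cells_alt
  simp only []
  set raw0 := PySem.Chars.strip line.toList with hraw0
  set raw1 := (if PySem.Chars.startswith raw0 ['|']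
               then PySem.Chars.slice raw0 (some 1) none else raw0) with hraw1
  set raw := (if PySem.Chars.endswith raw1 ['|']
              then PySem.Chars.slice raw1 none (some (-1)) else raw1) with hraw
  have hA := foldA_segE raw false [] []
  rw [attachHead_nil _ (segE_ne_nil false raw)] at hA
  simp only [List.nil_append] at hA
  rw [splitOn_pipe raw]
  obtain ⟨p, ps, hsp⟩ : ∃ p ps, splitPipe raw = p :: ps := by
    cases h : splitPipe raw with
    | nil => exact absurd h (splitPipe_ne_nil raw)
    | cons p ps => exact ⟨p, ps, rfl⟩
  rw [hsp]
  have hB := foldB_mergeFold ps [] p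
  have hm : mergeFold p ps = segE false raw := by
    have h0 : mergeAll [] raw = mergeFold p ps := by simp [mergeAll, hsp]
    rw [← h0, mergeAll_segE raw [],
      show (decide (pvTrail [] % 2 = 1)) = false from by decide,
      attachHead_nil _ (segE_ne_nil false raw)]
  rw [hm] at hB
  simp only [List.nil_append] at hB
  rcases hfa : raw.foldl pvStepA ([], [], false) with ⟨cells, current, e⟩
  rcases hfb : ps.foldl pvStepB ([], p) with ⟨cellsB, acc⟩
  rw [hfa] at hA
  rw [hfb] at hB
  simp only at hA hB
  simp only [hfb]
  rw [hA, ← hB]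
  simp [List.map_map, Function.comp]
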